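-- pv_equiv track=rewrite | github.com/yonsweng/ps | codejam/2022/chain_reactions.py | compute
-- ===== SOURCE A (Python) =====
-- INF = 1000000000
--
-- def compute(F, children, me):
--     if me not in children:
--         return F[me], F[me]
--
--     min_of_max, max_of_max, sum_of_total = INF, 0, 0
--     for child in children[me]:
--         maximum, total = compute(F, children, child)
--         min_of_max = min(min_of_max, maximum)
--         max_of_max = max(max_of_max, maximum)
--         sum_of_total += total
--
--     maximum = max(max_of_max, F[me])
--     total = sum_of_total - min_of_max + max(min_of_max, F[me])
--     return maximum, total
-- ===== SOURCE B (Python) =====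
-- INF = 1000000000
--
-- def compute(F, children, me):
--     # Iterative two-phase (explicit stack) post-order traversal instead of recursion.
--     # Note: 'children' is only read; no argument is mutated.
--     results = {}
--     stack = [(me, False)]
--     while stack:
--         node, processed = stack.pop()
--         if node not in children:
--             results[node] = (F[node], F[node])
--         elif processed:
--             rets = [results[c] for c in children[node]]
--             maxs = [m for m, _ in rets]
--             mn = min([INF] + maxs)
--             mx = max([0] + maxs)
--             s = sum(t for _, t in rets)
--             results[node] = (max(mx, F[node]), s - mn + max(mn, F[node]))
--         else:
--             stack.append((node, True))
--             stack.extend((c, False) for c in children[node])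
--     return results[me]
-- ===== Notes on version B (the rewrite author's own statement) =====
-- stated objective: alternative
-- what changed: Replaced the recursive tree DP by an iterative explicit-stack two-phase post-order traversal that stores each finished node's (maximum, total) pair in a results dict and aggregates children via list min/max/sum instead of a three-accumulator loop.
import Mathlib
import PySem

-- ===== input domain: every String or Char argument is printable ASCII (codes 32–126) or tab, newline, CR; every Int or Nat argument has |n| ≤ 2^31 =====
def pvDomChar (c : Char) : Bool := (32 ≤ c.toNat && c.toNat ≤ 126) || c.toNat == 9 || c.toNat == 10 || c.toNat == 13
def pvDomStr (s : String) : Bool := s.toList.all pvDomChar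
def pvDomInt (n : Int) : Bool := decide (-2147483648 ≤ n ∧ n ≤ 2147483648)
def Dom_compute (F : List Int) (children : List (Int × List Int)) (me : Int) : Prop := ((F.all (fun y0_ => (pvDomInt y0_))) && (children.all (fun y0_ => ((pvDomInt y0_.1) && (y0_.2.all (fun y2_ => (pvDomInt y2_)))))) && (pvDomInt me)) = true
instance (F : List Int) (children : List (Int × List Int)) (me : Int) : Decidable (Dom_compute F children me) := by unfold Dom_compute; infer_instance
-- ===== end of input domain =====

-- B replaces A's recursion by an explicit-stack two-phase post-order traversal with a results dict
-- (objective: alternative decomposition, same cost); return values proved equal on Pre_compute.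


-- ===== PORT A =====
def INFc : Int := 1000000000

-- Python's recursion has no a-priori bound in Lean, so both ports take explicit fuel;
-- under Pre_compute (finite recursion tree) the chosen fuel is proved sufficient.
mutual
  -- literal port of A's recursive body
  def computeFuel (fuel : Nat) (F : List Int) (children : List (Int × List Int)) (me : Int) :
      Option (Int × Int) :=
    match fuel with
    | 0 => none
    | f + 1 =>
      match PySem.Dict.get? (PySem.Dict.mk children) me with
      | none =>
        match PySem.List.pyGet? F me with
        | none => none
        | some v => some (v, v)
      | some cs =>
        match runChildren f F children cs (INFc, 0, 0) with
        | none => none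
        | some st =>
          match PySem.List.pyGet? F me with
          | none => none
          | some v => some (max st.2.1 v, st.2.2 - st.1 + max st.1 v)
  termination_by (fuel, 0)
  -- literal port of A's 'for child in children[me]' loop over the three accumulators
  def runChildren (fuel : Nat) (F : List Int) (children : List (Int × List Int))
      (cs : List Int) (st : Int × Int × Int) : Option (Int × Int × Int) :=
    match cs with
    | [] => some st
    | c :: rest =>
      match computeFuel fuel F children c with
      | none => none
      | some mt => runChildren fuel F children rest (min st.1 mt.1, max st.2.1 mt.1, st.2.2 + mt.2)
  termination_by (fuel, cs.length + 1)
end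

def compute (F : List Int) (children : List (Int × List Int)) (me : Int) : Int × Int :=
  (computeFuel (children.length + 1) F children me).getD (0, 0)

-- ===== PORT B =====
-- aggregation of the children's stored pairs, as in Source B (min([INF]+maxs) = foldl min INF maxs)
def nodeValue (rets : List (Int × Int)) (v : Int) : Int × Int :=
  let maxs := rets.map Prod.fst
  let mn := maxs.foldl min INFc
  let mx := maxs.foldl max 0
  let s := (rets.map Prod.snd).foldl (· + ·) 0
  (max mx v, s - mn + max mn v)

-- literal port of Source B's while loop; head of the list = top of the Python stack, so
-- 'stack.extend(children[node])' pushes the reversed child list in front.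
def loopB (fuel : Nat) (F : List Int) (children : List (Int × List Int))
    (stack : List (Int × Bool)) (results : PySem.Dict Int (Int × Int)) (me : Int) :
    Option (Int × Int) :=
  match fuel with
  | 0 => none
  | f + 1 =>
    match stack with
    | [] => PySem.Dict.get? results me
    | (node, processed) :: rest =>
      match PySem.Dict.get? (PySem.Dict.mk children) node with
      | none =>
        match PySem.List.pyGet? F node with
        | none => none
        | some v => loopB f F children rest (results.insert node (v, v)) me
      | some cs =>
        if processed then
          match cs.mapM (fun c => PySem.Dict.get? results c), PySem.List.pyGet? F node with
          | some rets, some v => loopB f F children rest (results.insert node (nodeValue rets v)) me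
          | _, _ => none
        else
          loopB f F children ((cs.map (fun c => (c, false))).reverse ++ (node, true) :: rest)
            results me

-- fuel bound for B's loop: twice the recursion-tree size (each node is popped at most twice)
def costAux (fuel : Nat) (children : List (Int × List Int)) (n : Int) : Nat :=
  match fuel with
  | 0 => 1
  | f + 1 =>
    match PySem.Dict.get? (PySem.Dict.mk children) n with
    | none => 1
    | some cs => 2 + (cs.map (costAux f children)).sum

def compute_alt (F : List Int) (children : List (Int × List Int)) (me : Int) : Int × Int :=
  (loopB (costAux (children.length + 1) children me + 1) F children [(me, false)]
    PySem.Dict.empty me).getD (0, 0)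

-- ===== PRECONDITION & SPEC =====
-- Pre_compute = exactly the inputs on which Python A returns: every node reachable from 'me'
-- along children edges is a valid (possibly negative) index into F, and no such path runs into a
-- cycle; elsewhere A raises IndexError or RecursionError.  goodAux is a SHAPE predicate on the
-- input graph (a bounded descent over the children edges checking only key membership and index
-- validity — a path of distinct dict keys has length ≤ children.length, so depth children.length+1
-- is exhaustive); it computes none of the ports' values and mentions neither port.
def goodAux (fuel : Nat) (F : List Int) (children : List (Int × List Int)) (me : Int) : Bool :=
  match fuel with
  | 0 => false
  | f + 1 =>
    match PySem.Dict.get? (PySem.Dict.mk children) me with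
    | none => (PySem.List.pyGet? F me).isSome
    | some cs => cs.all (goodAux f F children) && (PySem.List.pyGet? F me).isSome

def Pre_compute (F : List Int) (children : List (Int × List Int)) (me : Int) : Prop :=
  goodAux (children.length + 1) F children me = true

instance (F : List Int) (children : List (Int × List Int)) (me : Int) :
    Decidable (Pre_compute F children me) := by unfold Pre_compute; infer_instance

def pvWitness_compute : List Int × (List (Int × List Int)) × Int := ([3, 4], [(0, [1])], 0)

def Spec_compute (F : List Int) (children : List (Int × List Int)) (me : Int) (out : Int × Int) : Prop := out = compute_alt F children me
instance (F : List Int) (children : List (Int × List Int)) (me : Int) (out : Int × Int) : Decidable (Spec_compute F children me out) := by unfold Spec_compute; infer_instance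

-- ===== CLAIM (what is proved, stated in full; the proofs are below) =====
def Claim_equal_compute : Prop := ∀ (F : List Int) (children : List (Int × List Int)) (me : Int), Dom_compute F children me → Pre_compute F children me → Spec_compute F children me (compute F children me)

-- ===== LEMMAS AND PROOFS =====

-- fuel monotonicity of A's port
theorem computeFuel_mono : ∀ (f : Nat) (F : List Int) (children : List (Int × List Int))
    (me : Int) (v : Int × Int) (f' : Nat), f ≤ f' →
    computeFuel f F children me = some v → computeFuel f' F children me = some v := by
  intro f
  induction f with
  | zero => intro F children me v f' _ h; simp [computeFuel] at h
  | succ f ih =>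
    intro F children me v f' hle h
    obtain ⟨g, rfl⟩ : ∃ g, f' = g + 1 := ⟨f' - 1, by omega⟩
    have hrun : ∀ (cs : List Int) (st out : Int × Int × Int),
        runChildren f F children cs st = some out → runChildren g F children cs st = some out := by
      intro cs
      induction cs with
      | nil => intro st out h; simpa [runChildren] using h
      | cons c rest ihr =>
        intro st out h
        unfold runChildren at h ⊢
        cases hcf : computeFuel f F children c with
        | none => rw [hcf] at h; exact absurd h (by simp)
        | some mt =>
          rw [hcf] at h
          rw [ih F children c mt g (by omega) hcf]
          exact ihr _ _ h
    unfold computeFuel at h ⊢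
    cases hd : PySem.Dict.get? (PySem.Dict.mk children) me with
    | none => rw [hd] at h; exact h
    | some cs =>
      rw [hd] at h
      dsimp only at h ⊢
      cases hr : runChildren f F children cs (INFc, 0, 0) with
      | none => rw [hr] at h; exact absurd h (by simp)
      | some st => rw [hr] at h; rw [hrun _ _ _ hr]; exact h

theorem computeFuel_unique (F : List Int) (children : List (Int × List Int)) (me : Int)
    (f g : Nat) (v w : Int × Int) (hv : computeFuel f F children me = some v)
    (hw : computeFuel g F children me = some w) : v = w := by
  have h1 := computeFuel_mono f F children me v (max f g) (le_max_left f g) hv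
  have h2 := computeFuel_mono g F children me w (max f g) (le_max_right f g) hw
  rw [h2] at h1; exact (Option.some_inj.mp h1).symm

-- totality under goodAux
theorem computeFuel_total : ∀ (f : Nat) (F : List Int) (children : List (Int × List Int))
    (me : Int), goodAux f F children me = true → ∃ v, computeFuel f F children me = some v := by
  intro f
  induction f with
  | zero => intro F children me h; simp [goodAux] at h
  | succ f ih =>
    intro F children me h
    unfold goodAux at h
    unfold computeFuel
    cases hd : PySem.Dict.get? (PySem.Dict.mk children) me with
    | none =>
      rw [hd] at h
      dsimp only
      obtain ⟨v, hv⟩ := Option.isSome_iff_exists.mp h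
      exact ⟨(v, v), by simp [hv]⟩
    | some cs =>
      rw [hd] at h
      obtain ⟨hall, hsome⟩ := (Bool.and_eq_true _ _).mp h
      have hrun : ∀ (cs' : List Int), (∀ c ∈ cs', goodAux f F children c = true) →
          ∀ st, ∃ out, runChildren f F children cs' st = some out := by
        intro cs'
        induction cs' with
        | nil => intro _ st; exact ⟨st, by simp [runChildren]⟩
        | cons c rest ihr =>
          intro hg st
          obtain ⟨mt, hmt⟩ := ih F children c (hg c (by simp))
          obtain ⟨out, hout⟩ := ihr (fun c' hc' => hg c' (by simp [hc'])) 
            (min st.1 mt.1, max st.2.1 mt.1, st.2.2 + mt.2)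
          exact ⟨out, by unfold runChildren; rw [hmt]; exact hout⟩
      obtain ⟨out, hout⟩ := hrun cs (fun c hc => by
        have := List.all_eq_true.mp hall c hc; simpa using this) (INFc, 0, 0)
      obtain ⟨v, hv⟩ := Option.isSome_iff_exists.mp hsome
      exact ⟨(max out.2.1 v, out.2.2 - out.1 + max out.1 v), by simp [hout, hv]⟩

-- A's accumulator loop computes the three list aggregates of the children's values
theorem runChildren_spec (f : Nat) (F : List Int) (children : List (Int × List Int)) :
    ∀ (cs : List Int) (rets : List (Int × Int)) (st : Int × Int × Int),
    cs.mapM (fun c => computeFuel f F children c) = some rets →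
    runChildren f F children cs st =
      some (rets.foldl (fun a p => min a p.1) st.1,
            rets.foldl (fun a p => max a p.1) st.2.1,
            rets.foldl (fun a p => a + p.2) st.2.2) := by
  intro cs
  induction cs with
  | nil =>
    intro rets st h
    simp only [List.mapM_nil, Option.pure_def, Option.some_inj] at h
    subst h
    simp [runChildren]
  | cons c rest ih =>
    intro rets st h
    rw [List.mapM_cons] at h
    cases hcf : computeFuel f F children c with
    | none => rw [hcf] at h; simp at h
    | some mt =>
      rw [hcf] at h
      cases hrest : rest.mapM (fun c => computeFuel f F children c) with
      | none => rw [hrest] at h; simp at h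
      | some vs =>
        rw [hrest] at h
        simp only [Option.bind_eq_bind, Option.bind_some, Option.pure_def, Option.some_inj] at h
        subst h
        unfold runChildren
        rw [hcf]
        exact ih vs (min st.1 mt.1, max st.2.1 mt.1, st.2.2 + mt.2) hrest

-- dict entries proved correct throughout B's run
def Correct (F : List Int) (children : List (Int × List Int))
    (r : PySem.Dict Int (Int × Int)) : Prop :=
  ∀ (k : Int) (v : Int × Int), r.get? k = some v → ∃ f, computeFuel f F children k = some v

-- both runs of mapM over an option-valued function succeed with the same list of results
theorem mapM_pair {g1 g2 : Int → Option (Int × Int)} : ∀ (l : List Int),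
    (∀ c ∈ l, ∃ w, g1 c = some w ∧ g2 c = some w) →
    ∃ rets, l.mapM g1 = some rets ∧ l.mapM g2 = some rets := by
  intro l
  induction l with
  | nil => exact fun _ => ⟨[], by simp, by simp⟩
  | cons c rest ih =>
    intro h
    obtain ⟨w, hw1, hw2⟩ := h c (by simp)
    obtain ⟨rets, hr1, hr2⟩ := ih (fun a ha => h a (by simp [ha]))
    exact ⟨w :: rets, by rw [List.mapM_cons, hw1, hr1]; rfl,
      by rw [List.mapM_cons, hw2, hr2]; rfl⟩

-- core simulation: popping an unprocessed good node consumes exactly its cost and records its value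
theorem loopB_sim : ∀ (f : Nat) (F : List Int) (children : List (Int × List Int)) (me : Int)
    (n : Int) (stack : List (Int × Bool)) (r : PySem.Dict Int (Int × Int)) (k : Nat),
    goodAux f F children n = true → Correct F children r →
    ∃ r', Correct F children r' ∧ (r'.get? n).isSome ∧
      (∀ m : Int, (r.get? m).isSome → (r'.get? m).isSome) ∧
      loopB (costAux f children n + k) F children ((n, false) :: stack) r me =
        loopB k F children stack r' me := by
  intro f
  induction f with
  | zero => intro F children me n stack r k hg; simp [goodAux] at hg
  | succ f ih =>
    intro F children me
    have hlist : ∀ (L : List Int), (∀ c ∈ L, goodAux f F children c = true) →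
        ∀ (stack : List (Int × Bool)) (r : PySem.Dict Int (Int × Int)) (k : Nat),
        Correct F children r →
        ∃ r', Correct F children r' ∧ (∀ c ∈ L, (r'.get? c).isSome) ∧
          (∀ m : Int, (r.get? m).isSome → (r'.get? m).isSome) ∧
          loopB ((L.map (costAux f children)).sum + k) F children
              (L.map (fun c => (c, false)) ++ stack) r me =
            loopB k F children stack r' me := by
      intro L
      induction L with
      | nil => intro _ stack r k hr; exact ⟨r, hr, by simp, fun _ h => h, by simp⟩
      | cons c L' ihl =>
        intro hg stack r k hr
        obtain ⟨r1, hr1c, hr1n, hr1p, hr1eq⟩ :=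
          ih F children me c (L'.map (fun c => (c, false)) ++ stack) r
            ((L'.map (costAux f children)).sum + k) (hg c (by simp)) hr
        obtain ⟨r2, hr2c, hr2all, hr2p, hr2eq⟩ :=
          ihl (fun a ha => hg a (by simp [ha])) stack r1 k hr1c
        refine ⟨r2, hr2c, ?_, fun m hm => hr2p m (hr1p m hm), ?_⟩
        · intro a ha
          rcases List.mem_cons.mp ha with rfl | ha'
          · exact hr2p a hr1n
          · exact hr2all a ha'
        · have harith : ((c :: L').map (costAux f children)).sum + k
              = costAux f children c + ((L'.map (costAux f children)).sum + k) := by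
            simp [List.map_cons, List.sum_cons]; omega
          rw [harith, List.map_cons, List.cons_append, hr1eq, hr2eq]
    intro n stack r k hg hr
    unfold goodAux at hg
    cases hd : PySem.Dict.get? (PySem.Dict.mk children) n with
    | none =>
      rw [hd] at hg
      obtain ⟨v, hv⟩ := Option.isSome_iff_exists.mp hg
      have hcost : costAux (f + 1) children n = 1 := by unfold costAux; rw [hd]
      refine ⟨r.insert n (v, v), ?_, ?_, ?_, ?_⟩
      · intro k' v' h
        rw [PySem.Dict.get?_insert] at h
        split_ifs at h with he
        · rw [Option.some_inj] at h
          subst h; subst he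
          exact ⟨1, by simp [computeFuel, hd, hv]⟩
        · exact hr k' v' h
      · rw [PySem.Dict.get?_insert]; simp
      · intro m hm
        rw [PySem.Dict.get?_insert]
        split_ifs with he
        · simp
        · exact hm
      · rw [hcost, show (1 : Nat) + k = k + 1 from by omega]
        simp [loopB, hd, hv]
    | some cs =>
      rw [hd] at hg
      obtain ⟨hall, hsome⟩ := (Bool.and_eq_true _ _).mp hg
      have hallg : ∀ c ∈ cs, goodAux f F children c = true := fun c hc => by
        have := List.all_eq_true.mp hall c hc; simpa using this
      obtain ⟨v, hv⟩ := Option.isSome_iff_exists.mp hsome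
      have hcost : costAux (f + 1) children n = 2 + (cs.map (costAux f children)).sum := by
        unfold costAux; rw [hd]
      -- step 1: pop the unprocessed frame, pushing the (reversed) children and the processed frame
      have hstep1 : loopB (costAux (f + 1) children n + k) F children ((n, false) :: stack) r me
          = loopB ((cs.reverse.map (costAux f children)).sum + (k + 1)) F children
              (cs.reverse.map (fun c => (c, false)) ++ (n, true) :: stack) r me := by
        have h1 : costAux (f + 1) children n + k
            = ((cs.reverse.map (costAux f children)).sum + (k + 1)) + 1 := by
          rw [hcost, List.map_reverse, List.sum_reverse]; omega
        rw [h1]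
        simp [loopB, hd, List.map_reverse]
      -- step 2: the children frames run to completion
      obtain ⟨r1, hr1c, hr1all, hr1p, hr1eq⟩ :=
        hlist cs.reverse (fun c hc => hallg c (List.mem_reverse.mp hc))
          ((n, true) :: stack) r (k + 1) hr
      -- step 3: pop the processed frame and store the node's pair
      have hpair : ∀ c ∈ cs, ∃ w, PySem.Dict.get? r1 c = some w
          ∧ computeFuel f F children c = some w := by
        intro c hc
        obtain ⟨w, hw⟩ := Option.isSome_iff_exists.mp (hr1all c (List.mem_reverse.mpr hc))
        obtain ⟨g', hg'⟩ := hr1c c w hw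
        obtain ⟨wc, hwc⟩ := computeFuel_total f F children c (hallg c hc)
        exact ⟨w, hw, (computeFuel_unique F children c f g' wc w hwc hg') ▸ hwc⟩
      obtain ⟨rets, hm1, hm2⟩ := mapM_pair cs hpair
      have hAval : computeFuel (f + 1) F children n = some (nodeValue rets v) := by
        unfold computeFuel
        rw [hd]
        dsimp only
        rw [runChildren_spec f F children cs rets (INFc, 0, 0) hm2]
        dsimp only
        rw [hv]
        simp [nodeValue, List.foldl_map]
      have hstep3 : loopB (k + 1) F children ((n, true) :: stack) r1 me
          = loopB k F children stack (r1.insert n (nodeValue rets v)) me := by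
        simp [loopB, hd, hm1, hv]
      refine ⟨r1.insert n (nodeValue rets v), ?_, ?_, ?_, ?_⟩
      · intro k' v' h
        rw [PySem.Dict.get?_insert] at h
        split_ifs at h with he
        · rw [Option.some_inj] at h
          subst h; subst he
          exact ⟨f + 1, hAval⟩
        · exact hr1c k' v' h
      · rw [PySem.Dict.get?_insert]; simp
      · intro m hm
        rw [PySem.Dict.get?_insert]
        split_ifs with he
        · simp
        · exact hr1p m hm
      · rw [hstep1, hr1eq, hstep3]

-- ===== VERDICT (by name: the statement is the Claim_ definition above) =====
theorem compute_spec : Claim_equal_compute := by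
  intro F children me _ hpre
  unfold Spec_compute
  obtain ⟨a, ha⟩ := computeFuel_total (children.length + 1) F children me hpre
  obtain ⟨r', hrc, hrn, -, heq⟩ :=
    loopB_sim (children.length + 1) F children me me [] PySem.Dict.empty 1 hpre
      (fun k v h => by simp [PySem.Dict.get?_empty] at h)
  obtain ⟨w, hw⟩ := Option.isSome_iff_exists.mp hrn
  obtain ⟨g, hg⟩ := hrc me w hw
  have hwa : w = a := computeFuel_unique F children me g (children.length + 1) w a hg ha
  have hB : compute_alt F children me = w := by
    unfold compute_alt
    rw [heq]
    simp [loopB, hw]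
  have hA : compute F children me = a := by
    unfold compute
    rw [ha]
    rfl
  rw [hA, hB, hwa]
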